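-- pv_equiv track=rewrite | github.com/eyalios/calculator-with-digit-recognition | nothing.py | maxSpecialProduct
-- ===== SOURCE A (Python) =====
-- def maxSpecialProduct(A):
--
--         maxi = 0
--         for i in range(len(A)):
--             cur_right = -1
--             cur_left = -1
--             for j in range(max(i,len(A)-i)):
--                 left_index = i-j-1
--                 right_index = i+j+1
--                 if(left_index >= 0 and A[left_index]>A[i] and cur_left == -1 ):
--                     cur_left = left_index
--                 if(right_index < len(A) and A[right_index] > A[i] and cur_right == -1):
--                     cur_right = right_index
--             if(cur_left == -1):
--                 cur_left = 0
--             if(cur_right == -1):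
--                 cur_right = 0
--             if(cur_left*cur_right>maxi):
--                 maxi = cur_left*cur_right
--         return maxi
-- ===== SOURCE B (Python) =====
-- def _nearestGreater(A, order):
--     # for each index i in processing order: nearest previously-processed index j
--     # with A[j] > A[i] (0 if none), via a monotonic stack
--     out = []
--     stack = []
--     for i in order:
--         while stack and A[stack[-1]] <= A[i]:
--             stack.pop()
--         out.append(stack[-1] if stack else 0)
--         stack.append(i)
--     return out
--
--
-- def maxSpecialProduct(A):
--     n = len(A)
--     left = _nearestGreater(A, range(n))
--     right = _nearestGreater(A, range(n - 1, -1, -1))[::-1]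
--     maxi = 0
--     for i in range(n):
--         p = left[i] * right[i]
--         if p > maxi:
--             maxi = p
--     return maxi
-- ===== Notes on version B (the rewrite author's own statement) =====
-- stated objective: faster
-- what changed: A finds each element's nearest strictly-greater neighbour on the left and right by an O(n) outward scan per element; B computes both nearest-greater-index arrays with two monotonic-stack passes and then takes the max product in one final pass.
import Mathlib
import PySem

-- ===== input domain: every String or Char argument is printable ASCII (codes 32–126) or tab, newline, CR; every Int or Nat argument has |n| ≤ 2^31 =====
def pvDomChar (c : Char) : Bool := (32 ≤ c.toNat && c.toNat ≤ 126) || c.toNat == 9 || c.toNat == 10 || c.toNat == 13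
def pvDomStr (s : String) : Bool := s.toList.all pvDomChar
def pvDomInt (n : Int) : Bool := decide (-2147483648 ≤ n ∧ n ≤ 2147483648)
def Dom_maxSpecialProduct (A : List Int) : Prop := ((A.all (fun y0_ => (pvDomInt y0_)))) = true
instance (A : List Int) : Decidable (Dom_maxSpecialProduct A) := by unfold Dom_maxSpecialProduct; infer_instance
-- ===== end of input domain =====

-- B replaces A's per-element outward O(n^2) scan for the nearest greater element
-- on each side by two monotonic-stack passes (objective: faster, asymptotic).


-- ===== PORT A =====
-- literal port of A; the guards 'left_index >= 0' / 'right_index < n' make every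
-- A[...] access in range, so pyGetD's default 0 is never used
def maxSpecialProduct (A : List Int) : Int :=
  let n : Int := A.length
  (PySem.List.pyRange 0 n 1).foldl (fun maxi i =>
    let p := (PySem.List.pyRange 0 (max i (n - i)) 1).foldl
      (fun (st : Int × Int) j =>
        let left_index := i - j - 1
        let right_index := i + j + 1
        (if left_index ≥ 0 ∧ PySem.List.pyGetD A left_index 0 > PySem.List.pyGetD A i 0 ∧ st.1 = -1
           then left_index else st.1,
         if right_index < n ∧ PySem.List.pyGetD A right_index 0 > PySem.List.pyGetD A i 0 ∧ st.2 = -1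
           then right_index else st.2)) (-1, -1)
    let cur_left := if p.1 = -1 then 0 else p.1
    let cur_right := if p.2 = -1 then 0 else p.2
    if cur_left * cur_right > maxi then cur_left * cur_right else maxi) 0

-- ===== PORT B =====
-- 'while stack and A[stack[-1]] <= x: stack.pop()'; the stack is held top-first
def pvPop (A : List Int) (x : Int) : List Int → List Int
  | [] => []
  | t :: rest => if PySem.List.pyGetD A t 0 ≤ x then pvPop A x rest else t :: rest

-- port of _nearestGreater(A, order)
def pvNearestGreater (A : List Int) (order : List Int) : List Int :=
  (order.foldl (fun (st : List Int × List Int) i =>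
      let stack := pvPop A (PySem.List.pyGetD A i 0) st.2
      (st.1 ++ [stack.headD 0], i :: stack)) ([], [])).1

def maxSpecialProduct_alt (A : List Int) : Int :=
  let n : Int := A.length
  let left := pvNearestGreater A (PySem.List.pyRange 0 n 1)
  let right := (pvNearestGreater A (PySem.List.pyRange (n - 1) (-1) (-1))).reverse
  (PySem.List.pyRange 0 n 1).foldl (fun maxi i =>
    let p := PySem.List.pyGetD left i 0 * PySem.List.pyGetD right i 0
    if p > maxi then p else maxi) 0

-- ===== PRECONDITION & SPEC =====
def Spec_maxSpecialProduct (A : List Int) (out : Int) : Prop := out = maxSpecialProduct_alt A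
instance (A : List Int) (out : Int) : Decidable (Spec_maxSpecialProduct A out) := by unfold Spec_maxSpecialProduct; infer_instance

-- ===== CLAIM (what is proved, stated in full; the proofs are below) =====
def Claim_equal_maxSpecialProduct : Prop := ∀ (A : List Int), Dom_maxSpecialProduct A → Spec_maxSpecialProduct A (maxSpecialProduct A)

-- ===== LEMMAS AND PROOFS =====

-- q A k j: A[j] > A[k]
def pvQ (A : List Int) (k j : Nat) : Bool := decide (A.getD k 0 < A.getD j 0)

-- nearest greater to the left: nearest j < k with A[j] > A[k]
def pvLa (A : List Int) (k : Nat) : Option Nat :=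
  ((List.range k).reverse.filter (pvQ A k)).head?

-- nearest greater to the right: nearest j > k (j < |A|) with A[j] > A[k]
def pvRa (A : List Int) (k : Nat) : Option Nat :=
  ((List.range' (k + 1) (A.length - (k + 1))).filter (pvQ A k)).head?

def pvLval (A : List Int) (k : Nat) : Int := ((pvLa A k).map (fun (j : Nat) => (j : Int))).getD 0
def pvRval (A : List Int) (k : Nat) : Int := ((pvRa A k).map (fun (j : Nat) => (j : Int))).getD 0

-- the common shape both ports reduce to
def pvCore (A : List Int) : Int :=
  (PySem.List.pyRange 0 (A.length : Int) 1).foldl (fun maxi i =>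
    let p := pvLval A i.toNat * pvRval A i.toNat
    if p > maxi then p else maxi) 0

-- ---- generic first-hit characterisation (A's inner loop) ----

lemma pvFoldFirst_ne (C1 C2 : Int → Prop) [DecidablePred C1] [DecidablePred C2] (v : Int → Int) :
    ∀ (l : List Int) (s : Int), s ≠ -1 →
      l.foldl (fun st j => if C1 j ∧ C2 j ∧ st = -1 then v j else st) s = s := by
  intro l
  induction l with
  | nil => intro s _; rfl
  | cons a l ih =>
    intro s hs
    simp only [List.foldl_cons]
    rw [if_neg (by tauto)]
    exact ih s hs

lemma pvFoldFirst (C1 C2 : Int → Prop) [DecidablePred C1] [DecidablePred C2] (v : Int → Int) :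
    ∀ (l : List Int), (∀ j ∈ l, C1 j → C2 j → v j ≠ -1) →
      l.foldl (fun st j => if C1 j ∧ C2 j ∧ st = -1 then v j else st) (-1)
        = (((l.filter (fun j => decide (C1 j) && decide (C2 j))).head?.map v).getD (-1)) := by
  intro l
  induction l with
  | nil => intro _; rfl
  | cons a l ih =>
    intro h
    simp only [List.foldl_cons, List.filter_cons]
    by_cases h1 : C1 a
    · by_cases h2 : C2 a
      · rw [if_pos (show C1 a ∧ C2 a ∧ True from ⟨h1, h2, trivial⟩)]
        rw [pvFoldFirst_ne C1 C2 v l (v a) (h a (by simp) h1 h2)]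
        simp [h1, h2]
      · rw [if_neg (by tauto)]
        simp only [h2, decide_false, Bool.and_false]
        exact ih (fun j hj => h j (List.mem_cons_of_mem a hj))
    · rw [if_neg (by tauto)]
      simp only [h1, decide_false, Bool.false_and]
      exact ih (fun j hj => h j (List.mem_cons_of_mem a hj))

-- ---- generic stack lemmas ----

-- along a chain, dropWhile is a filter
lemma pvDropWhile_filter {α : Type} (r : α → α → Prop) (p : α → Bool)
    (H : ∀ a b, r a b → p b = true → p a = true) :
    ∀ (l : List α), l.Pairwise r → l.dropWhile p = l.filter (fun x => !p x) := by
  intro l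
  induction l with
  | nil => intro _; rfl
  | cons a l ih =>
    intro hp
    rw [List.pairwise_cons] at hp
    cases hpa : p a with
    | true =>
      rw [List.dropWhile_cons_of_pos hpa, List.filter_cons]
      simp only [hpa, Bool.not_true]
      exact ih hp.2
    | false =>
      rw [List.dropWhile_cons_of_neg (by simp [hpa]), List.filter_cons]
      simp only [hpa, Bool.not_false, if_true]
      congr 1
      rw [eq_comm, List.filter_eq_self]
      intro b hb
      cases hpb : p b with
      | true => exact absurd (H a b (hp.1 b hb) hpb) (by simp [hpa])
      | false => simp
  
-- the first q-element of a chain automatically satisfies the survival predicate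
lemma pvHeadFilter {α : Type} (r : α → α → Prop) (q P : α → Bool)
    (hasym : ∀ a b, r a b → ¬ r b a) :
    ∀ (l : List α), l.Pairwise r →
      (∀ j ∈ l, q j = true → (∀ m ∈ l, r m j → q m = false) → P j = true) →
      (l.filter (fun j => P j && q j)).head? = (l.filter q).head? := by
  intro l
  induction l with
  | nil => intro _ _; rfl
  | cons a l ih =>
    intro hp H
    rw [List.pairwise_cons] at hp
    cases hqa : q a with
    | true =>
      have hPa : P a = true := by
        refine H a (by simp) hqa ?_
        intro m hm hrma
        rcases List.mem_cons.mp hm with h | h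
        · cases h; exact absurd hrma (hasym _ _ hrma)
        · exact absurd hrma (hasym a m (hp.1 m h))
      simp [hqa, hPa]
    | false =>
      simp only [List.filter_cons, hqa, Bool.and_false]
      refine ih hp.2 ?_
      intro j hj hqj hall
      refine H j (List.mem_cons_of_mem a hj) hqj ?_
      intro m hm hrmj
      rcases List.mem_cons.mp hm with h | h
      · subst h; exact hqa
      · exact hall m h hrmj

-- ---- the left pass ----

def pvPL (A : List Int) (k j : Nat) : Bool :=
  decide (∀ m, m < k → j < m → A.getD m 0 < A.getD j 0)

def pvSL (A : List Int) (k : Nat) : List Nat :=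
  ((List.range k).filter (pvPL A k)).reverse

lemma pvSL_chain (A : List Int) (k : Nat) :
    (pvSL A k).Pairwise (fun a b => A.getD a 0 < A.getD b 0) := by
  have h1 : ((List.range k).filter (pvPL A k)).Pairwise (fun a b => a < b) :=
    List.Pairwise.filter _ List.pairwise_lt_range
  have h2 : (pvSL A k).Pairwise (fun a b => b < a) := by
    unfold pvSL
    exact List.pairwise_reverse.mpr h1
  refine List.Pairwise.imp_of_mem ?_ h2
  intro a b ha hb hba
  have hma : a ∈ (List.range k).filter (pvPL A k) := by
    simpa [pvSL, List.mem_reverse] using ha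
  have hmb : b ∈ (List.range k).filter (pvPL A k) := by
    simpa [pvSL, List.mem_reverse] using hb
  rcases List.mem_filter.mp hma with ⟨hra, hpa⟩
  rcases List.mem_filter.mp hmb with ⟨hrb, hpb⟩
  have hak : a < k := List.mem_range.mp hra
  have hPb : ∀ m, m < k → b < m → A.getD m 0 < A.getD b 0 := by
    simpa [pvPL] using hpb
  exact hPb a hak hba

lemma pvSL_succ (A : List Int) (k : Nat) :
    pvSL A (k + 1) = k :: (pvSL A k).dropWhile (fun j => decide (A.getD j 0 ≤ A.getD k 0)) := by
  rw [pvDropWhile_filter (fun a b => A.getD a 0 < A.getD b 0) _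
        (fun a b hr hp => by
          simp only [decide_eq_true_eq] at hp ⊢
          omega) _ (pvSL_chain A k)]
  unfold pvSL
  rw [List.range_succ, List.filter_append]
  have hk : pvPL A (k + 1) k = true := by
    simp only [pvPL, decide_eq_true_eq]
    intro m h1 h2; omega
  have hcong : (List.range k).filter (pvPL A (k + 1))
      = (List.range k).filter (fun j => pvPL A k j && !decide (A.getD j 0 ≤ A.getD k 0)) := by
    refine List.filter_congr ?_
    intro j hj
    have hjk : j < k := List.mem_range.mp hj
    simp only [pvPL, ← decide_not, ← Bool.decide_and, decide_eq_decide, not_le]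
    constructor
    · intro h
      exact ⟨fun m h1 h2 => h m (by omega) h2, h k (by omega) hjk⟩
    · rintro ⟨h1, h2⟩ m hm1 hm2
      rcases Nat.lt_succ_iff_lt_or_eq.mp hm1 with h | h
      · exact h1 m h hm2
      · subst h; exact h2
  have hk' : List.filter (pvPL A (k + 1)) [k] = [k] := by simp [hk]
  rw [hk', hcong, List.reverse_append, List.filter_reverse, List.filter_filter]
  simp only [List.reverse_cons, List.reverse_nil, List.nil_append, List.cons_append]
  congr 1
  exact congrArg List.reverse (List.filter_congr (fun j _ => Bool.and_comm _ _))

lemma pvSL_drop_head (A : List Int) (k : Nat) :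
    ((pvSL A k).dropWhile (fun j => decide (A.getD j 0 ≤ A.getD k 0))).head? = pvLa A k := by
  rw [pvDropWhile_filter (fun a b => A.getD a 0 < A.getD b 0) _
        (fun a b hr hp => by
          simp only [decide_eq_true_eq] at hp ⊢
          omega) _ (pvSL_chain A k)]
  have hq : ((pvSL A k).filter (fun j => !decide (A.getD j 0 ≤ A.getD k 0)))
      = (List.range k).reverse.filter (fun j => pvPL A k j && pvQ A k j) := by
    unfold pvSL
    rw [List.filter_reverse, List.filter_reverse, List.filter_filter]
    refine congrArg List.reverse (List.filter_congr ?_)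
    intro j _
    by_cases h : A.getD j 0 ≤ A.getD k 0
    · have h2 : ¬ (A.getD k 0 < A.getD j 0) := by omega
      simp only [List.getD_eq_getElem?_getD] at h h2
      simp [pvQ, h, h2]
    · have h2 : A.getD k 0 < A.getD j 0 := by omega
      simp only [List.getD_eq_getElem?_getD] at h h2
      simp [pvQ, h, h2]
  rw [hq]
  unfold pvLa
  refine pvHeadFilter (fun a b => b < a) (pvQ A k) (pvPL A k)
    (fun a b h => by omega) _ (List.pairwise_reverse.mpr List.pairwise_lt_range) ?_
  intro j hj hqj hall
  have hjk : j < k := by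
    have := List.mem_reverse.mp hj
    exact List.mem_range.mp this
  simp only [pvPL, decide_eq_true_eq]
  intro m hm1 hm2
  have hmem : m ∈ (List.range k).reverse := List.mem_reverse.mpr (List.mem_range.mpr hm1)
  have := hall m hmem hm2
  simp only [pvQ, decide_eq_false_iff_not, not_lt] at this
  simp only [pvQ, decide_eq_true_eq] at hqj
  omega

lemma pvPop_map (A : List Int) (x : Int) (s : List Nat) :
    pvPop A x (s.map (fun (j : Nat) => (j : Int)))
      = (s.dropWhile (fun j => decide (A.getD j 0 ≤ x))).map (fun (j : Nat) => (j : Int)) := by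
  induction s with
  | nil => rfl
  | cons a s ih =>
    rw [List.map_cons, pvPop, PySem.List.pyGetD_natCast]
    by_cases h : A.getD a 0 ≤ x
    · rw [if_pos h, List.dropWhile_cons_of_pos (by simpa using h)]
      exact ih
    · rw [if_neg h, List.dropWhile_cons_of_neg (by simpa using h), List.map_cons]

lemma pvLeft_inv (A : List Int) : ∀ (k : Nat), k ≤ A.length →
    (PySem.List.pyRange 0 (k : Int) 1).foldl
      (fun (st : List Int × List Int) i =>
        let stack := pvPop A (PySem.List.pyGetD A i 0) st.2
        (st.1 ++ [stack.headD 0], i :: stack)) ([], [])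
    = ((List.range k).map (pvLval A), (pvSL A k).map (fun (j : Nat) => (j : Int))) := by
  intro k
  induction k with
  | zero =>
    intro _
    rw [Nat.cast_zero, PySem.List.pyRange_one_eq_nil le_rfl]
    simp [pvSL]
  | succ k ih =>
    intro hk
    have hcast : ((k + 1 : Nat) : Int) = (k : Int) + 1 := by push_cast; ring
    rw [hcast, PySem.List.pyRange_one_succ_right (by exact_mod_cast Nat.zero_le k),
      List.foldl_append, ih (by omega)]
    simp only [List.foldl_cons, List.foldl_nil, PySem.List.pyGetD_natCast, pvPop_map]
    refine Prod.ext ?_ ?_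
    · show (List.range k).map (pvLval A) ++ [_] = _
      rw [List.headD_eq_head?, List.head?_map, pvSL_drop_head]
      rw [List.range_succ, List.map_append]
      rfl
    · show (k : Int) :: _ = _
      rw [pvSL_succ, List.map_cons]

-- ---- the right pass ----

def pvPR (A : List Int) (k j : Nat) : Bool :=
  decide (∀ m, m < j → k ≤ m → A.getD m 0 < A.getD j 0)

def pvSR (A : List Int) (k : Nat) : List Nat :=
  (List.range' k (A.length - k)).filter (pvPR A k)

lemma pvSR_chain (A : List Int) (k : Nat) :
    (pvSR A k).Pairwise (fun a b => A.getD a 0 < A.getD b 0) := by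
  have h1 : (pvSR A k).Pairwise (fun a b => a < b) :=
    List.Pairwise.filter _ (List.pairwise_lt_range' 1)
  refine List.Pairwise.imp_of_mem ?_ h1
  intro a b ha hb hab
  rcases List.mem_filter.mp hb with ⟨hrb, hpb⟩
  rcases List.mem_filter.mp ha with ⟨hra, _⟩
  have hka : k ≤ a := (List.mem_range'_1.mp hra).1
  have hPb : ∀ m, m < b → k ≤ m → A.getD m 0 < A.getD b 0 := by
    simpa [pvPR] using hpb
  exact hPb a hab hka

lemma pvSR_step (A : List Int) (k : Nat) (hk : k < A.length) :
    pvSR A k = k :: (pvSR A (k + 1)).dropWhile (fun j => decide (A.getD j 0 ≤ A.getD k 0)) := by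
  rw [pvDropWhile_filter (fun a b => A.getD a 0 < A.getD b 0) _
        (fun a b hr hp => by
          simp only [decide_eq_true_eq] at hp ⊢
          omega) _ (pvSR_chain A (k + 1))]
  unfold pvSR
  rw [show A.length - k = (A.length - (k + 1)) + 1 by omega, List.range'_succ, List.filter_cons]
  have hkk : pvPR A k k = true := by
    simp only [pvPR, decide_eq_true_eq]; intro m h1 h2; omega
  rw [hkk]
  simp only [if_true]
  congr 1
  rw [List.filter_filter]
  refine List.filter_congr ?_
  intro j hj
  have hjk : k + 1 ≤ j := (List.mem_range'_1.mp hj).1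
  rw [Bool.eq_iff_iff]
  simp only [pvPR, Bool.and_eq_true, Bool.not_eq_true', decide_eq_true_eq,
    decide_eq_false_iff_not, not_le]
  constructor
  · intro h
    exact ⟨h k (by omega) le_rfl, fun m hm1 hm2 => h m hm1 (by omega)⟩
  · rintro ⟨h2, h1⟩ m hm1 hm2
    rcases Nat.eq_or_lt_of_le hm2 with h | h
    · subst h; exact h2
    · exact h1 m hm1 h

lemma pvSR_drop_head (A : List Int) (k : Nat) :
    ((pvSR A (k + 1)).dropWhile (fun j => decide (A.getD j 0 ≤ A.getD k 0))).head? = pvRa A k := by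
  rw [pvDropWhile_filter (fun a b => A.getD a 0 < A.getD b 0) _
        (fun a b hr hp => by
          simp only [decide_eq_true_eq] at hp ⊢
          omega) _ (pvSR_chain A (k + 1))]
  have hq : ((pvSR A (k + 1)).filter (fun j => !decide (A.getD j 0 ≤ A.getD k 0)))
      = (List.range' (k + 1) (A.length - (k + 1))).filter (fun j => pvPR A (k + 1) j && pvQ A k j) := by
    unfold pvSR
    rw [List.filter_filter]
    refine List.filter_congr ?_
    intro j _
    by_cases h : A.getD j 0 ≤ A.getD k 0
    · have h2 : ¬ (A.getD k 0 < A.getD j 0) := by omega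
      simp only [List.getD_eq_getElem?_getD] at h h2
      simp [pvQ, h, h2]
    · have h2 : A.getD k 0 < A.getD j 0 := by omega
      simp only [List.getD_eq_getElem?_getD] at h h2
      simp [pvQ, h, h2]
  rw [hq]
  unfold pvRa
  refine pvHeadFilter (fun a b => a < b) (pvQ A k) (pvPR A (k + 1))
    (fun a b h => by omega) _ (List.pairwise_lt_range' 1) ?_
  intro j hj hqj hall
  have hjn : j < k + 1 + (A.length - (k + 1)) := (List.mem_range'_1.mp hj).2
  simp only [pvPR, decide_eq_true_eq]
  intro m hm1 hm2
  have hmem : m ∈ List.range' (k + 1) (A.length - (k + 1)) :=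
    List.mem_range'_1.mpr ⟨hm2, by omega⟩
  have := hall m hmem hm1
  simp only [pvQ, decide_eq_false_iff_not, not_lt] at this
  simp only [pvQ, decide_eq_true_eq] at hqj
  omega

lemma pvRange_neg_one_succ (a b : Int) (h : b ≤ a) :
    PySem.List.pyRange a (b - 1) (-1) = PySem.List.pyRange a b (-1) ++ [b] := by
  rw [PySem.List.pyRange_neg_one, PySem.List.pyRange_neg_one]
  rw [show (a - (b - 1)).toNat = (a - b).toNat + 1 by omega, List.range_succ, List.map_append]
  congr 1
  simp only [List.map_cons, List.map_nil]
  congr 1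
  omega

lemma pvRight_inv (A : List Int) : ∀ (d : Nat), d ≤ A.length →
    (PySem.List.pyRange ((A.length : Int) - 1) ((A.length : Int) - d - 1) (-1)).foldl
      (fun (st : List Int × List Int) i =>
        let stack := pvPop A (PySem.List.pyGetD A i 0) st.2
        (st.1 ++ [stack.headD 0], i :: stack)) ([], [])
    = (((List.range' (A.length - d) d).reverse).map (pvRval A),
       (pvSR A (A.length - d)).map (fun (j : Nat) => (j : Int))) := by
  intro d
  induction d with
  | zero =>
    intro _
    simp only [Nat.cast_zero, Nat.sub_zero]
    rw [show ((A.length : Int) - 0 - 1) = (A.length : Int) - 1 by ring]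
    rw [PySem.List.pyRange_neg_one]
    rw [show ((A.length : Int) - 1 - ((A.length : Int) - 1)).toNat = 0 by omega]
    simp [pvSR]
  | succ d ih =>
    intro hd
    have hstep : ((A.length : Int) - (d + 1 : Nat) - 1) = ((A.length : Int) - d - 1) - 1 := by
      push_cast; ring
    rw [hstep, pvRange_neg_one_succ _ _ (by omega), List.foldl_append, ih (by omega)]
    have hk : ((A.length : Int) - d - 1) = ((A.length - (d + 1) : Nat) : Int) := by omega
    have hk1 : A.length - d = (A.length - (d + 1)) + 1 := by omega
    rw [hk, hk1]
    simp only [List.foldl_cons, List.foldl_nil, PySem.List.pyGetD_natCast, pvPop_map]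
    refine Prod.ext ?_ ?_
    · show _ ++ [_] = _
      rw [List.headD_eq_head?, List.head?_map, pvSR_drop_head]
      rw [List.range'_succ, List.reverse_cons, List.map_append]
      rfl
    · show ((A.length - (d + 1) : Nat) : Int) :: _
          = List.map (fun (j : Nat) => (j : Int)) (pvSR A (A.length - (d + 1)))
      rw [pvSR_step A (A.length - (d + 1)) (by omega), List.map_cons]

-- ---- A reduces to the core ----

lemma pvFilterRange (p : Nat → Bool) (k m : Nat) (hk : k ≤ m)
    (h : ∀ j, k ≤ j → p j = false) :
    (List.range m).filter p = (List.range k).filter p := by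
  conv_lhs => rw [show m = k + (m - k) by omega, List.range_add]
  rw [List.filter_append]
  have h2 : List.filter p ((List.range (m - k)).map (fun x => k + x)) = [] := by
    rw [List.filter_eq_nil_iff]
    intro a ha
    rcases List.mem_map.mp ha with ⟨x, _, rfl⟩
    simp [h (k + x) (by omega)]
  rw [h2, List.append_nil]

lemma pvRevRange (k : Nat) :
    (List.range k).reverse = (List.range k).map (fun j => k - 1 - j) := by
  conv_lhs => rw [List.range_eq_range', List.reverse_range']
  simp

lemma pvA_left (A : List Int) (k : Nat) (hkn : k < A.length) :
    (((PySem.List.pyRange 0 (max (k : Int) ((A.length : Int) - (k : Int))) 1).filter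
        (fun j => decide ((k : Int) - j - 1 ≥ 0) &&
          decide (PySem.List.pyGetD A ((k : Int) - j - 1) 0 > PySem.List.pyGetD A (k : Int) 0))).head?.map
      (fun j => (k : Int) - j - 1))
    = (pvLa A k).map (fun (j : Nat) => (j : Int)) := by
  have hM : (max (k : Int) ((A.length : Int) - (k : Int))) = ((max k (A.length - k) : Nat) : Int) := by
    push_cast; omega
  rw [hM, PySem.List.pyRange_zero_nat, List.filter_map, List.head?_map, Option.map_map]
  rw [pvFilterRange _ k _ (by omega) ?_]
  · rw [List.filter_congr (q := pvQ A k ∘ fun j => k - 1 - j) ?_]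
    · unfold pvLa
      rw [pvRevRange, List.filter_map, List.head?_map, Option.map_map]
      cases hL : (List.filter (pvQ A k ∘ fun j => k - 1 - j) (List.range k)).head? with
      | none => simp
      | some j =>
        have hjk : j < k := by
          have hm := List.mem_of_mem_head? (Option.mem_def.mpr hL)
          exact List.mem_range.mp (List.mem_of_mem_filter hm)
        simp only [Option.map_some, Function.comp_apply]
        congr 1
        omega
    · intro j hj
      have hjk : j < k := List.mem_range.mp hj
      have hc : ((k : Int) - (j : Nat) - 1) = ((k - 1 - j : Nat) : Int) := by omega
      simp only [Function.comp_apply, hc, PySem.List.pyGetD_natCast]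
      rw [decide_eq_true (show ((k - 1 - j : Nat) : Int) ≥ 0 by omega), Bool.true_and]
      simp only [pvQ]
  · intro j hj
    have h2 : ¬ ((k : Int) - (j : Nat) - 1 ≥ 0) := by omega
    show (decide ((k : Int) - (j : Nat) - 1 ≥ 0) && _) = false
    rw [decide_eq_false h2, Bool.false_and]

lemma pvA_right (A : List Int) (k : Nat) (hkn : k < A.length) :
    (((PySem.List.pyRange 0 (max (k : Int) ((A.length : Int) - (k : Int))) 1).filter
        (fun j => decide ((k : Int) + j + 1 < (A.length : Int)) &&
          decide (PySem.List.pyGetD A ((k : Int) + j + 1) 0 > PySem.List.pyGetD A (k : Int) 0))).head?.map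
      (fun j => (k : Int) + j + 1))
    = (pvRa A k).map (fun (j : Nat) => (j : Int)) := by
  have hM : (max (k : Int) ((A.length : Int) - (k : Int))) = ((max k (A.length - k) : Nat) : Int) := by
    push_cast; omega
  rw [hM, PySem.List.pyRange_zero_nat, List.filter_map, List.head?_map, Option.map_map]
  rw [pvFilterRange _ (A.length - (k + 1)) _ (by omega) ?_]
  · rw [List.filter_congr (q := pvQ A k ∘ fun j => k + 1 + j) ?_]
    · unfold pvRa
      rw [show List.range' (k + 1) (A.length - (k + 1))
            = (List.range (A.length - (k + 1))).map (fun j => k + 1 + j) from by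
          rw [List.range'_eq_map_range]]
      rw [List.filter_map, List.head?_map, Option.map_map]
      cases hL : (List.filter (pvQ A k ∘ fun j => k + 1 + j) (List.range (A.length - (k + 1)))).head? with
      | none => simp
      | some j =>
        simp only [Option.map_some, Function.comp_apply]
        congr 1
        omega
    · intro j hj
      have hjk : j < A.length - (k + 1) := List.mem_range.mp hj
      have hc : ((k : Int) + (j : Nat) + 1) = ((k + 1 + j : Nat) : Int) := by omega
      simp only [Function.comp_apply, hc, PySem.List.pyGetD_natCast]
      rw [decide_eq_true (show ((k + 1 + j : Nat) : Int) < (A.length : Int) by omega), Bool.true_and]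
      simp only [pvQ]
  · intro j hj
    have h2 : ¬ ((k : Int) + (j : Nat) + 1 < (A.length : Int)) := by omega
    show (decide ((k : Int) + (j : Nat) + 1 < (A.length : Int)) && _) = false
    rw [decide_eq_false h2, Bool.false_and]

lemma pvDefault (o : Option Nat) :
    (if ((o.map (fun (j : Nat) => (j : Int))).getD (-1)) = -1 then 0
     else ((o.map (fun (j : Nat) => (j : Int))).getD (-1)))
    = (o.map (fun (j : Nat) => (j : Int))).getD 0 := by
  cases o with
  | none => simp
  | some j =>
    simp only [Option.map_some, Option.getD_some]
    rw [if_neg (by omega)]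

lemma pvA_eq_core (A : List Int) : maxSpecialProduct A = pvCore A := by
  simp only [maxSpecialProduct, pvCore]
  refine PySem.List.foldl_congr_mem _ _ _ _ ?_
  intro maxi i hi
  rcases PySem.List.mem_pyRange_one.mp hi with ⟨h0, h1⟩
  obtain ⟨k, rfl⟩ : ∃ (k : Nat), i = (k : Int) := ⟨i.toNat, by omega⟩
  have hkn : k < A.length := by omega
  rw [PySem.List.foldl_prod_mk
      (f := fun s j => if (k : Int) - j - 1 ≥ 0 ∧
          PySem.List.pyGetD A ((k : Int) - j - 1) 0 > PySem.List.pyGetD A (k : Int) 0 ∧ s = -1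
        then (k : Int) - j - 1 else s)
      (g := fun s j => if (k : Int) + j + 1 < (A.length : Int) ∧
          PySem.List.pyGetD A ((k : Int) + j + 1) 0 > PySem.List.pyGetD A (k : Int) 0 ∧ s = -1
        then (k : Int) + j + 1 else s)]
  rw [pvFoldFirst (fun j => (k : Int) - j - 1 ≥ 0)
      (fun j => PySem.List.pyGetD A ((k : Int) - j - 1) 0 > PySem.List.pyGetD A (k : Int) 0)
      (fun j => (k : Int) - j - 1) _ (fun j _ hc1 _ => by
        replace hc1 : (0 : Int) ≤ (k : Int) - j - 1 := hc1
        show ¬ ((k : Int) - j - 1 = -1)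
        omega)]
  rw [pvFoldFirst (fun j => (k : Int) + j + 1 < (A.length : Int))
      (fun j => PySem.List.pyGetD A ((k : Int) + j + 1) 0 > PySem.List.pyGetD A (k : Int) 0)
      (fun j => (k : Int) + j + 1) _ (fun j hj _ _ => by
        have hj0 := (PySem.List.mem_pyRange_one.mp hj).1
        show ¬ ((k : Int) + j + 1 = -1)
        omega)]
  rw [pvA_left A k hkn, pvA_right A k hkn, pvDefault, pvDefault]
  simp only [Int.toNat_natCast]
  rfl

-- ---- B reduces to the core ----

lemma pvB_eq_core (A : List Int) : maxSpecialProduct_alt A = pvCore A := by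
  have hleft : pvNearestGreater A (PySem.List.pyRange 0 (A.length : Int) 1)
      = (List.range A.length).map (pvLval A) := by
    unfold pvNearestGreater
    rw [pvLeft_inv A A.length le_rfl]
  have hright : (pvNearestGreater A (PySem.List.pyRange ((A.length : Int) - 1) (-1) (-1))).reverse
      = (List.range A.length).map (pvRval A) := by
    unfold pvNearestGreater
    have h := pvRight_inv A A.length le_rfl
    rw [show ((A.length : Int) - (A.length : Nat) - 1) = -1 by simp] at h
    rw [h, Nat.sub_self]
    rw [show List.range' 0 A.length = List.range A.length from (List.range_eq_range').symm]
    rw [← List.map_reverse, List.reverse_reverse]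
  simp only [maxSpecialProduct_alt, pvCore, hleft, hright]
  refine PySem.List.foldl_congr_mem _ _ _ _ ?_
  intro acc i hi
  rcases PySem.List.mem_pyRange_one.mp hi with ⟨h0, h1⟩
  have hkn : i.toNat < A.length := by omega
  have hL : PySem.List.pyGetD ((List.range A.length).map (pvLval A)) i 0 = pvLval A i.toNat := by
    rw [PySem.List.pyGetD_eq_getElem _ _ h0 (by simpa using h1)]
    simp
  have hR : PySem.List.pyGetD ((List.range A.length).map (pvRval A)) i 0 = pvRval A i.toNat := by
    rw [PySem.List.pyGetD_eq_getElem _ _ h0 (by simpa using h1)]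
    simp
  rw [hL, hR]

-- ===== VERDICT (by name: the statement is the Claim_ definition above) =====
theorem maxSpecialProduct_spec : Claim_equal_maxSpecialProduct := by
  intro A _
  show maxSpecialProduct A = maxSpecialProduct_alt A
  rw [pvA_eq_core, pvB_eq_core]
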